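-- pv_equiv track=rewrite | github.com/WarwickCSNotes/WarwickCSNotes | scripts/bullets_to_callouts.py | transform
-- ===== SOURCE A (Python) =====
-- def transform(content: str) -> str:
--     trailing_nl = content.endswith("\n")
--     lines = content.splitlines()
--     out: list[str] = []
--     i = 0
--     n = len(lines)
--
--     while i < n:
--         line = lines[i]
--
--         # Top-level bullet (column 0)?
--         if line.startswith("- ") or line.startswith("* "):
--             title = line[2:].rstrip()
--
--             body: list[str] = []
--             i += 1
--             while i < n:
--                 nl = lines[i]
--                 if nl.startswith("- ") or nl.startswith("* ") or nl.startswith("#"):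
--                     break
--                 body.append(nl)
--                 i += 1
--
--             # Trim trailing blank lines from body
--             while body and body[-1].strip() == "":
--                 body.pop()
--
--             # Un-indent 4 spaces from each body line
--             body = [bl[4:] if bl.startswith("    ") else bl for bl in body]
--
--             out.append(f"> [!note]+ {title}")
--             for bl in body:
--                 out.append(">" if bl == "" else f"> {bl}")
--             out.append("")  # blank line after callout
--         else:
--             out.append(line)
--             i += 1
--
--     return "\n".join(out) + ("\n" if trailing_nl else "")
-- ===== SOURCE B (Python) =====
-- def transform(content: str) -> str:
--     trailing_nl = content.endswith("\n")
--     out: list[str] = []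
--     in_callout = False
--     title = ""
--     body: list[str] = []
--
--     def flush() -> None:
--         nonlocal in_callout, body
--         while body and body[-1].strip() == "":
--             body.pop()
--         out.append(f"> [!note]+ {title}")
--         for bl in body:
--             s = bl[4:] if bl.startswith("    ") else bl
--             out.append(">" if s == "" else f"> {s}")
--         out.append("")
--         in_callout = False
--         body = []
--
--     for line in content.splitlines():
--         if line.startswith("- ") or line.startswith("* "):
--             if in_callout:
--                 flush()
--             in_callout = True
--             title = line[2:].rstrip()
--             body = []
--         elif in_callout and line.startswith("#"):
--             flush()
--             out.append(line)
--         elif in_callout: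
--             body.append(line)
--         else:
--             out.append(line)
--
--     if in_callout:
--         flush()
--
--     return "\n".join(out) + ("\n" if trailing_nl else "")
-- ===== Notes on version B (the rewrite author's own statement) =====
-- stated objective: alternative
-- what changed: Replaced A's explicit index with an inner lookahead-consuming while-loop by a single flat for-loop state machine (in_callout/title/body accumulator with a flush helper).
import Mathlib
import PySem

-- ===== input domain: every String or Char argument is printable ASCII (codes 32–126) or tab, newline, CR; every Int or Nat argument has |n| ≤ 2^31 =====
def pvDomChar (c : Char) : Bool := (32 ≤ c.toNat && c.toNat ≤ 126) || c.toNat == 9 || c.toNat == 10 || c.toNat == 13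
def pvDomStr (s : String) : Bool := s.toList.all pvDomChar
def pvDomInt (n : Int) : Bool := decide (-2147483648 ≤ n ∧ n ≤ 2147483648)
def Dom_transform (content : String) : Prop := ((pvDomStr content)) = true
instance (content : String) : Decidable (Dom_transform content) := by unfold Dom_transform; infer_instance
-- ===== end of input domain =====

-- B replaces A's explicit index + inner lookahead-consuming while-loop by a single flat
-- fold/state-machine over the lines (objective: alternative decomposition, same cost).

-- ===== PORT A =====
-- shared text helpers (identical code appears verbatim in both Python versions)

-- line.startswith("- ") or line.startswith("* ")
def pvBullet (l : List Char) : Bool :=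
  PySem.Chars.startswith l "- ".toList || PySem.Chars.startswith l "* ".toList

-- the inner while's break condition: bullet or '#'
def pvStop (l : List Char) : Bool :=
  pvBullet l || PySem.Chars.startswith l "#".toList

-- line[2:].rstrip()
def pvTitle (l : List Char) : List Char :=
  PySem.Chars.rstrip (PySem.List.slice l (some 2) none)

-- bl[4:] if bl.startswith("    ") else bl
def pvUnindent (bl : List Char) : List Char :=
  if PySem.Chars.startswith bl "    ".toList then PySem.List.slice bl (some 4) none else bl

-- ">" if bl == "" else f"> {bl}"
def pvRender (bl : List Char) : List Char :=
  if bl = [] then ">".toList else "> ".toList ++ bl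

-- while body and body[-1].strip() == "": body.pop()
def pvTrim (b : List (List Char)) : List (List Char) :=
  if h1 : b = [] then b
  else if PySem.Chars.strip (b.getLast h1) = [] then pvTrim b.dropLast else b
termination_by b.length
decreasing_by
  rw [List.length_dropLast]
  have : b.length ≠ 0 := by simpa [List.length_eq_zero_iff] using h1
  omega

-- A's inner while: consume body lines until a bullet / '#' line (which is NOT consumed)
def pvConsume : List (List Char) → List (List Char) × List (List Char)
  | [] => ([], [])
  | l :: ls => if pvStop l then ([], l :: ls)
               else let p := pvConsume ls; (l :: p.1, p.2)

theorem pvConsume_snd_length_le (ls : List (List Char)) : (pvConsume ls).2.length ≤ ls.length := by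
  induction ls with
  | nil => simp [pvConsume]
  | cons l ls ih =>
      simp only [pvConsume]
      split
      · simp
      · simp; omega

-- A's outer while over the line index i
def pvALoop : List (List Char) → List (List Char)
  | [] => []
  | line :: rest =>
    if pvBullet line then
      let title := pvTitle line
      let p := pvConsume rest
      let body := (pvTrim p.1).map pvUnindent
      (("> [!note]+ ".toList ++ title) :: body.map pvRender ++ [[]]) ++ pvALoop p.2
    else line :: pvALoop rest
termination_by l => l.length
decreasing_by
  · have := pvConsume_snd_length_le rest; simp; omega
  · simp

def transform (content : String) : String :=
  let trailingNl := PySem.Chars.endswith content.toList "\n".toList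
  let lines := PySem.Chars.splitlines content.toList
  let out := pvALoop lines
  String.ofList (PySem.Chars.join "\n".toList out ++ (if trailingNl then "\n".toList else []))

-- ===== PORT B =====
-- flush(): trim trailing blanks, emit header, rendered un-indented body, blank line
def pvFlushB (out : List (List Char)) (t : List Char) (b : List (List Char)) : List (List Char) :=
  out ++ (("> [!note]+ ".toList ++ t) ::
    (pvTrim b).map (fun bl => pvRender (pvUnindent bl)) ++ [[]])

-- one step of the for-loop; state = (out, in_callout, title, body)
def pvBStep (st : List (List Char) × Bool × List Char × List (List Char)) (line : List Char) :
    List (List Char) × Bool × List Char × List (List Char) :=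
  if pvBullet line then
    ((if st.2.1 then pvFlushB st.1 st.2.2.1 st.2.2.2 else st.1), true, pvTitle line, [])
  else if st.2.1 && PySem.Chars.startswith line "#".toList then
    (pvFlushB st.1 st.2.2.1 st.2.2.2 ++ [line], false, st.2.2.1, [])
  else if st.2.1 then
    (st.1, true, st.2.2.1, st.2.2.2 ++ [line])
  else
    (st.1 ++ [line], false, st.2.2.1, st.2.2.2)

def transform_alt (content : String) : String :=
  let trailingNl := PySem.Chars.endswith content.toList "\n".toList
  let lines := PySem.Chars.splitlines content.toList
  let s := lines.foldl pvBStep ([], false, [], [])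
  let out := if s.2.1 then pvFlushB s.1 s.2.2.1 s.2.2.2 else s.1
  String.ofList (PySem.Chars.join "\n".toList out ++ (if trailingNl then "\n".toList else []))

-- ===== PRECONDITION & SPEC =====
def Spec_transform (content : String) (out : String) : Prop := out = transform_alt content
instance (content : String) (out : String) : Decidable (Spec_transform content out) := by unfold Spec_transform; infer_instance

-- ===== CLAIM (what is proved, stated in full; the proofs are below) =====
def Claim_equal_transform : Prop := ∀ (content : String), Dom_transform content → Spec_transform content (transform content)

-- ===== LEMMAS AND PROOFS =====

-- the callout block a flush emits, without the accumulated prefix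
def pvPiece (t : List Char) (b : List (List Char)) : List (List Char) :=
  ("> [!note]+ ".toList ++ t) :: (pvTrim b).map (fun bl => pvRender (pvUnindent bl)) ++ [[]]

theorem pvFlushB_eq (out : List (List Char)) (t : List Char) (b : List (List Char)) :
    pvFlushB out t b = out ++ pvPiece t b := rfl

-- run B's fold from a given state and finish
def pvBRun (lines : List (List Char)) (st : List (List Char) × Bool × List Char × List (List Char)) :
    List (List Char) :=
  let s := lines.foldl pvBStep st
  if s.2.1 then pvFlushB s.1 s.2.2.1 s.2.2.2 else s.1

theorem pvBRun_eq_pvALoop (lines : List (List Char)) :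
    (∀ out t b, pvBRun lines (out, false, t, b) = out ++ pvALoop lines) ∧
    (∀ out t b, pvBRun lines (out, true, t, b) =
      out ++ pvPiece t (b ++ (pvConsume lines).1) ++ pvALoop (pvConsume lines).2) := by
  induction lines with
  | nil =>
      constructor
      · intro out t b; simp [pvBRun, pvALoop]
      · intro out t b; simp [pvBRun, pvConsume, pvALoop, pvFlushB_eq]
  | cons l ls ih =>
      constructor
      · intro out t b
        by_cases hb : pvBullet l
        · have step : pvBRun (l :: ls) (out, false, t, b)
              = pvBRun ls (out, true, pvTitle l, []) := by
            simp [pvBRun, pvBStep, hb]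
          rw [step, ih.2]
          rw [pvALoop]
          simp [hb, pvPiece, Function.comp]
        · have step : pvBRun (l :: ls) (out, false, t, b)
              = pvBRun ls (out ++ [l], false, t, b) := by
            simp [pvBRun, pvBStep, hb]
          rw [step, ih.1, pvALoop]
          simp [hb]
      · intro out t b
        by_cases hb : pvBullet l
        · have step : pvBRun (l :: ls) (out, true, t, b)
              = pvBRun ls (pvFlushB out t b, true, pvTitle l, []) := by
            simp [pvBRun, pvBStep, hb]
          rw [step, ih.2, pvFlushB_eq]
          have hstop : pvStop l = true := by simp [pvStop, hb]
          rw [show pvConsume (l :: ls) = ([], l :: ls) by simp [pvConsume, hstop]]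
          rw [pvALoop]
          simp [hb, pvPiece, Function.comp]
        · by_cases hh : PySem.Chars.startswith l ['#'] = true
          · have step : pvBRun (l :: ls) (out, true, t, b)
                = pvBRun ls (pvFlushB out t b ++ [l], false, t, []) := by
              simp [pvBRun, pvBStep, hb, hh]
            rw [step, ih.1, pvFlushB_eq]
            have hstop : pvStop l = true := by simp [pvStop, hb]; exact hh
            rw [show pvConsume (l :: ls) = ([], l :: ls) by simp [pvConsume, hstop]]
            rw [pvALoop]
            simp [hb]
          · have step : pvBRun (l :: ls) (out, true, t, b)
                = pvBRun ls (out, true, t, b ++ [l]) := by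
              simp [pvBRun, pvBStep, hb, hh]
            rw [step, ih.2]
            have hstop : pvStop l = false := by simp [pvStop, hb]; simpa using hh
            rw [show pvConsume (l :: ls) = (l :: (pvConsume ls).1, (pvConsume ls).2) by
              simp [pvConsume, hstop]]
            simp

-- ===== VERDICT (by name: the statement is the Claim_ definition above) =====
theorem transform_spec : Claim_equal_transform := by
  intro content _
  unfold Spec_transform transform transform_alt
  have h := (pvBRun_eq_pvALoop (PySem.Chars.splitlines content.toList)).1 [] [] []
  simp only [pvBRun] at h
  simp only []
  rw [h]
  simp
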